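-- pv_equiv track=rewrite | github.com/bokunimowakaru/rohm_iot_for_spresense | ble_logger_sens_gatt.py | payval
-- ===== SOURCE A (Python) =====
-- def payval(val,num, bytes=1, sign=False):
--     a = 0
--     for i in range(0, bytes):
--         a += (256 ** i) * int(val[(num - 2 + i) * 2 : (num - 1 + i) * 2],16)
--     if sign:
--         if a >= 2 ** (bytes * 8 - 1):
--             a -= 2 ** (bytes * 8)
--     return a
-- ===== SOURCE B (Python) =====
-- def payval(val, num, bytes=1, sign=False):
--     if bytes <= 0:
--         return 0
--     start = (num - 2) * 2
--     buf = bytearray.fromhex(val[start : start + 2 * bytes])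
--     if len(buf) < bytes:
--         raise ValueError("hex field out of range")
--     return int.from_bytes(buf, 'little', signed=sign)
-- ===== Notes on version B (the rewrite author's own statement) =====
-- stated objective: idiomatic
-- what changed: A loops over byte indices, slicing and int()-parsing each two-character pair and weighting it by 256**i, then fixes the sign with an explicit branch; B slices the whole hex field once, decodes it with bytearray.fromhex (validating the field length), and lets int.from_bytes(..., 'little', signed=sign) do the weighted sum and two's-complement adjustment, with an early return 0 for a nonpositive byte count.
-- outside the precondition, e.g. on payval('abc', 3, 1, False): A returns 12, B raises ValueError; on payval(' 7', 2, 1, False): A returns 7, B raises ValueError; on payval('c9056a4ad', -3, 2, False): A returns 36876, B raises ValueError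
import Mathlib
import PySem

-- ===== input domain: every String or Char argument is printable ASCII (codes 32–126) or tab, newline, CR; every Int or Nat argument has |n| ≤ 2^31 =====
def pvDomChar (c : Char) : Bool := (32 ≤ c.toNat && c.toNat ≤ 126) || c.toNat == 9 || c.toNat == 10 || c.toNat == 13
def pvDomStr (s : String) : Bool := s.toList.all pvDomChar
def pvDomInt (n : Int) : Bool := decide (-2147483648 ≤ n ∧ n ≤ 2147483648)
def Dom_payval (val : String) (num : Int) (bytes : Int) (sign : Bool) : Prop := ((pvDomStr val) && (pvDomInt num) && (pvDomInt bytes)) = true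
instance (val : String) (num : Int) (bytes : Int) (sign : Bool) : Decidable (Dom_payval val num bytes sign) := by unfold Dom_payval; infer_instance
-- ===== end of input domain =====

-- B replaces A's per-byte slice-and-int() accumulation loop and explicit sign branch by one slice of
-- the whole field, a fromhex decode with a field-length validation, and a little-endian signed
-- from_bytes; objective: idiomatic.

-- ===== PORT A =====
-- int(s, 16) is PySem.Int.ofStrBase? (none = ValueError, excluded by Pre_, so .getD 0 is unreachable there).
-- Python computes the float 2.0 ** (bytes*8-1) when bytes ≤ 0; there the loop leaves a = 0 and, on
-- the inputs Pre_ admits, the comparison is false in Python and in this port, so the .toNat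
-- exponents are exact there (when the float underflows to 0.0 Python returns the float 0.0; Pre_
-- excludes those inputs).
def payval (val : String) (num : Int) (bytes : Int) (sign : Bool) : Int :=
  let a : Int := (PySem.List.pyRange 0 bytes 1).foldl
    (fun a i =>
      a + 256 ^ i.toNat *
        (PySem.Int.ofStrBase? (PySem.Str.slice val (some ((num - 2 + i) * 2)) (some ((num - 1 + i) * 2))) 16).getD 0)
    0
  if sign = true then
    if 2 ^ (bytes * 8 - 1).toNat ≤ a then a - 2 ^ (bytes * 8).toNat else a
  else a

-- ===== PORT B =====
-- bytearray.fromhex: skip ASCII whitespace between byte pairs, read two hex digits per byte;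
-- none = ValueError (excluded by Pre_, so the .getD [] below is unreachable there). On the
-- printable-ASCII domain a single character is accepted by int(c,16) exactly when it is a hex
-- digit, so the digit test is PySem.Int.ofCharsBase? on one character.
def pvFromhex? : List Char → Option (List Int)
  | [] => some []
  | c :: rest =>
    if c = ' ' ∨ c = '\t' ∨ c = '\n' ∨ c = '\r' ∨ c = '\x0b' ∨ c = '\x0c' then pvFromhex? rest
    else
      match rest with
      | [] => none
      | d :: rest' =>
        match PySem.Int.ofCharsBase? [c] 16, PySem.Int.ofCharsBase? [d] 16 with
        | some h, some l => (pvFromhex? rest').map (fun bs => (16 * h + l) :: bs)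
        | _, _ => none

-- int.from_bytes(bs, 'little', signed): little-endian weighted sum with two's-complement adjustment
def pvIntFromBytesLE (bs : List Int) (signed : Bool) : Int :=
  let n : Int := bs.foldr (fun b acc => acc * 256 + b) 0
  if signed = true ∧ 2 ^ (8 * bs.length - 1) ≤ n then n - 2 ^ (8 * bs.length) else n

def payval_alt (val : String) (num : Int) (bytes : Int) (sign : Bool) : Int :=
  if bytes ≤ 0 then 0
  else
    let start := (num - 2) * 2
    let buf := (pvFromhex? (PySem.Str.slice val (some start) (some (start + 2 * bytes))).toList).getD []
    -- B raises ValueError on a truncated field; Pre_ excludes that, so this branch is unreachable there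
    if (buf.length : Int) < bytes then 0
    else pvIntFromBytesLE buf sign

-- ===== PRECONDITION & SPEC =====
def pvHexChars : List Char := ['0','1','2','3','4','5','6','7','8','9','a','b','c','d','e','f','A','B','C','D','E','F']
def pvIsHex (c : Char) : Bool := pvHexChars.contains c

-- For a positive byte count Pre_ excludes: fields starting before the string (num < 2), where
-- Python's negative-index slice wraparound applies (A raises on most of it); fields extending past
-- the string, where A reads a truncated final field; and field characters that are not plain hex
-- digits, where only int()'s tolerance of whitespace/signs lets A return.
-- Pre_ also excludes sign = true with bytes ≤ -135, where 2.0**(bytes*8-1) underflows to 0.0 and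
-- A returns the float 0.0 instead of an int.
def Pre_payval (val : String) (num : Int) (bytes : Int) (sign : Bool) : Prop :=
  (bytes ≤ 0 ∧ (sign = false ∨ -134 ≤ bytes)) ∨
  (2 ≤ num ∧ 0 ≤ bytes ∧ (num - 2 + bytes) * 2 ≤ (val.toList.length : Int) ∧
    (PySem.List.slice val.toList (some ((num - 2) * 2)) (some ((num - 2 + bytes) * 2))).all pvIsHex = true)
instance (val : String) (num : Int) (bytes : Int) (sign : Bool) : Decidable (Pre_payval val num bytes sign) := by unfold Pre_payval; infer_instance

def pvWitness_payval : String × Int × Int × Bool := ("12ff", 2, 2, true)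

def Spec_payval (val : String) (num : Int) (bytes : Int) (sign : Bool) (out : Int) : Prop := out = payval_alt val num bytes sign
instance (val : String) (num : Int) (bytes : Int) (sign : Bool) (out : Int) : Decidable (Spec_payval val num bytes sign out) := by unfold Spec_payval; infer_instance

-- ===== CLAIM (what is proved, stated in full; the proofs are below) =====
def Claim_equal_payval : Prop := ∀ (val : String) (num : Int) (bytes : Int) (sign : Bool), Dom_payval val num bytes sign → Pre_payval val num bytes sign → Spec_payval val num bytes sign (payval val num bytes sign)

-- ===== LEMMAS AND PROOFS =====

-- the value of one hex digit, and the byte list a hex field denotes (proof-side vocabulary)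
def pvHexVal (c : Char) : Int :=
  if '0' ≤ c ∧ c ≤ '9' then (c.toNat : Int) - 48
  else if 'a' ≤ c ∧ c ≤ 'f' then (c.toNat : Int) - 87
  else (c.toNat : Int) - 55

def pvFromHex : List Char → List Int
  | c0 :: c1 :: rest => (16 * pvHexVal c0 + pvHexVal c1) :: pvFromHex rest
  | _ => []

def pvFromBytesLE (bs : List Int) : Int := bs.foldr (fun b acc => acc * 256 + b) 0

-- int(s,16) on a two-hex-digit string, by exhausting the 22 × 22 digit pairs
set_option maxRecDepth 100000 in
theorem pv_parse_pair (c0 c1 : Char) (h0 : c0 ∈ pvHexChars) (h1 : c1 ∈ pvHexChars) :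
    PySem.Int.ofCharsBase? [c0, c1] 16 = some (16 * pvHexVal c0 + pvHexVal c1) := by
  fin_cases h0 <;> fin_cases h1 <;> decide

-- int(c,16) on a single hex digit
set_option maxRecDepth 100000 in
theorem pv_parse_single (c : Char) (h : c ∈ pvHexChars) :
    PySem.Int.ofCharsBase? [c] 16 = some (pvHexVal c) := by
  fin_cases h <;> decide

-- a hex digit is not ASCII whitespace
theorem pv_hex_not_ws (c : Char) (h : c ∈ pvHexChars) :
    ¬ (c = ' ' ∨ c = '\t' ∨ c = '\n' ∨ c = '\r' ∨ c = '\x0b' ∨ c = '\x0c') := by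
  fin_cases h <;> decide

theorem pv_isHex_mem (c : Char) (h : pvIsHex c = true) : c ∈ pvHexChars := by
  simpa [pvIsHex] using h

theorem pv_ofStr (s : String) : PySem.Int.ofStrBase? s 16 = PySem.Int.ofCharsBase? s.toList 16 := by
  conv_lhs => rw [← String.ofList_toList (s := s)]
  rw [PySem.Int.ofStrBase?_ofList]

theorem pv_foldr_init (bs : List Int) (x : Int) :
    bs.foldr (fun b acc => acc * 256 + b) x
      = bs.foldr (fun b acc => acc * 256 + b) 0 + x * 256 ^ bs.length := by
  induction bs with
  | nil => simp
  | cons b t ih => simp [ih]; ring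

theorem pv_fromHex_append : ∀ (n : Nat) (cs ds : List Char), cs.length = 2 * n →
    pvFromHex (cs ++ ds) = pvFromHex cs ++ pvFromHex ds := by
  intro n
  induction n with
  | zero => intro cs ds h; simp at h; simp [h, pvFromHex]
  | succ m ih =>
    intro cs ds h
    match cs with
    | [] => simp at h
    | [c] => simp at h; omega
    | c0 :: c1 :: t =>
      simp at h
      simp [pvFromHex, ih t ds (by omega)]

theorem pv_fromHex_length : ∀ (n : Nat) (cs : List Char), cs.length = 2 * n →
    (pvFromHex cs).length = n := by
  intro n
  induction n with
  | zero => intro cs h; simp at h; simp [h, pvFromHex]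
  | succ m ih =>
    intro cs h
    match cs with
    | [] => simp at h
    | [c] => simp at h; omega
    | c0 :: c1 :: t =>
      simp at h
      simp [pvFromHex, ih t (by omega)]

theorem pv_fromBytesLE_append (bs : List Int) (x : Int) :
    pvFromBytesLE (bs ++ [x]) = pvFromBytesLE bs + x * 256 ^ bs.length := by
  unfold pvFromBytesLE
  rw [List.foldr_append]
  rw [show List.foldr (fun b acc => acc * 256 + b) 0 [x] = x from by simp]
  rw [pv_foldr_init]

-- B side: fromhex on an even-length all-hex field decodes exactly the field's byte list
theorem pv_fromhex_eq : ∀ (n : Nat) (cs : List Char), cs.length = 2 * n →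
    (∀ c ∈ cs, pvIsHex c = true) → pvFromhex? cs = some (pvFromHex cs) := by
  intro n
  induction n with
  | zero =>
    intro cs h _
    simp at h
    simp [h, pvFromhex?, pvFromHex]
  | succ m ih =>
    intro cs h hhex
    match cs with
    | [] => simp at h
    | [c] => simp at h; omega
    | c0 :: c1 :: t =>
      simp at h
      have m0 : c0 ∈ pvHexChars := pv_isHex_mem c0 (hhex c0 (by simp))
      have m1 : c1 ∈ pvHexChars := pv_isHex_mem c1 (hhex c1 (by simp))
      rw [show pvFromhex? (c0 :: c1 :: t)
          = if c0 = ' ' ∨ c0 = '\t' ∨ c0 = '\n' ∨ c0 = '\r' ∨ c0 = '\x0b' ∨ c0 = '\x0c'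
            then pvFromhex? (c1 :: t)
            else match PySem.Int.ofCharsBase? [c0] 16, PySem.Int.ofCharsBase? [c1] 16 with
              | some h, some l => (pvFromhex? t).map (fun bs => (16 * h + l) :: bs)
              | _, _ => none
        from rfl]
      rw [if_neg (pv_hex_not_ws c0 m0)]
      rw [pv_parse_single c0 m0, pv_parse_single c1 m1]
      rw [ih t (by omega) (fun c hc => hhex c (by simp [hc]))]
      rfl

-- the heart, A side: A's indexed accumulation over range(bytes) equals the little-endian value of
-- the field's byte list
theorem pv_main (val : String) (p : Nat) : ∀ (n : Nat),
    2 * p + 2 * n ≤ val.toList.length →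
    (∀ c ∈ (val.toList.drop (2 * p)).take (2 * n), pvIsHex c = true) →
    (PySem.List.pyRange 0 (n : Int) 1).foldl
      (fun a i =>
        a + 256 ^ i.toNat *
          (PySem.Int.ofStrBase? (PySem.Str.slice val (some (((p : Int) + i) * 2)) (some (((p : Int) + 1 + i) * 2))) 16).getD 0)
      0
    = pvFromBytesLE (pvFromHex ((val.toList.drop (2 * p)).take (2 * n))) := by
  intro n
  induction n with
  | zero =>
    intro _ _
    rw [PySem.List.pyRange_one_eq_nil (by omega)]
    simp [pvFromHex, pvFromBytesLE]
  | succ m ih =>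
    intro hlen hhex
    have hk0 : 2 * p + 2 * m < val.toList.length := by omega
    have hk1 : 2 * p + 2 * m + 1 < val.toList.length := by omega
    set L := val.toList with hL
    set c0 := L[2 * p + 2 * m]'hk0 with hc0
    set c1 := L[2 * p + 2 * m + 1]'hk1 with hc1
    have hdrop : L.drop (2 * p + 2 * m) = c0 :: c1 :: L.drop (2 * p + 2 * m + 2) := by
      rw [List.drop_eq_getElem_cons hk0, List.drop_eq_getElem_cons hk1]
    have hTsucc : (L.drop (2 * p)).take (2 * (m + 1))
        = (L.drop (2 * p)).take (2 * m) ++ [c0, c1] := by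
      rw [show 2 * (m + 1) = 2 * m + 2 from by ring, List.take_add, List.drop_drop]
      rw [hdrop]
      rfl
    have hlenTm : ((L.drop (2 * p)).take (2 * m)).length = 2 * m := by
      simp [List.length_take, List.length_drop]; omega
    have hmem0 : c0 ∈ (L.drop (2 * p)).take (2 * (m + 1)) := by rw [hTsucc]; simp
    have hmem1 : c1 ∈ (L.drop (2 * p)).take (2 * (m + 1)) := by rw [hTsucc]; simp
    have hhexm : ∀ c ∈ (L.drop (2 * p)).take (2 * m), pvIsHex c = true := by
      intro c hc
      exact hhex c (by rw [hTsucc]; exact List.mem_append_left _ hc)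
    have hih := ih (by omega) hhexm
    have hcast : ((m + 1 : Nat) : Int) = (m : Int) + 1 := by push_cast; ring
    rw [hcast, PySem.List.pyRange_one_succ_right (by positivity), List.foldl_append]
    simp only [List.foldl_cons, List.foldl_nil]
    rw [hih]
    have e1 : ((p : Int) + (m : Int)) * 2 = ((2 * (p + m) : Nat) : Int) := by push_cast; ring
    have e2 : ((p : Int) + 1 + (m : Int)) * 2 = ((2 * (p + m) : Nat) : Int) + ((2 : Nat) : Int) := by
      push_cast; ring
    rw [pv_ofStr, PySem.Str.toList_slice]
    show _ + 256 ^ (m : Int).toNat *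
        (PySem.Int.ofCharsBase? (PySem.List.slice L (some (((p : Int) + (m : Int)) * 2)) (some (((p : Int) + 1 + (m : Int)) * 2))) 16).getD 0 = _
    rw [e1, e2, PySem.List.slice_natCast_add]
    rw [show 2 * (p + m) = 2 * p + 2 * m from by ring, hdrop]
    rw [show (c0 :: c1 :: L.drop (2 * p + 2 * m + 2)).take 2 = [c0, c1] from rfl]
    rw [pv_parse_pair c0 c1 (pv_isHex_mem c0 (hhex c0 hmem0)) (pv_isHex_mem c1 (hhex c1 hmem1))]
    rw [hTsucc, pv_fromHex_append m _ _ hlenTm]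
    rw [show pvFromHex [c0, c1] = [16 * pvHexVal c0 + pvHexVal c1] from rfl]
    rw [pv_fromBytesLE_append, pv_fromHex_length m _ hlenTm, Int.toNat_natCast,
      Option.getD_some]
    ring

-- ===== VERDICT (by name: the statement is the Claim_ definition above) =====
theorem payval_spec : Claim_equal_payval := by
  intro val num bytes sign _dom hpre
  rcases hpre with ⟨hneg, _⟩ | ⟨h2, hb0, hlen, hhex⟩
  · -- bytes ≤ 0: A's loop is empty, B's early return fires; both return 0
    unfold Spec_payval payval payval_alt
    rw [PySem.List.pyRange_one_eq_nil hneg]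
    have ht : (bytes * 8 - 1).toNat = 0 := by omega
    simp [ht, hneg]
  · obtain ⟨p, rfl⟩ : ∃ p : Nat, num = (p : Int) + 2 := ⟨(num - 2).toNat, by omega⟩
    obtain ⟨n, rfl⟩ : ∃ n : Nat, bytes = (n : Int) := ⟨bytes.toNat, by omega⟩
    unfold Spec_payval payval payval_alt
    have ea : ∀ i : Int, (p : Int) + 2 - 2 + i = (p : Int) + i := fun i => by ring
    have eb : ∀ i : Int, (p : Int) + 2 - 1 + i = (p : Int) + 1 + i := fun i => by ring
    have e1 : ((p : Int) + 2 - 2) * 2 = ((2 * p : Nat) : Int) := by push_cast; ring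
    have hlen' : 2 * p + 2 * n ≤ val.toList.length := by
      have := hlen
      have hsl : val.toList.length = val.length := by simp
      push_cast at this
      omega
    rw [e1, show ((p : Int) + 2 - 2 + (n : Int)) * 2 = ((2 * p : Nat) : Int) + ((2 * n : Nat) : Int) from by push_cast; ring,
      PySem.List.slice_natCast_add] at hhex
    have hhex' : ∀ c ∈ (val.toList.drop (2 * p)).take (2 * n), pvIsHex c = true := by
      intro c hc
      exact List.all_eq_true.mp hhex c hc
    simp only [ea, eb]
    rw [pv_main val p n hlen' hhex']
    by_cases hn : n = 0
    · subst hn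
      simp [pvFromHex, pvFromBytesLE]
    · have hpos : (0 : Int) < (n : Int) := by exact_mod_cast Nat.pos_of_ne_zero hn
      rw [if_neg (by omega : ¬ ((n : Int) ≤ 0))]
      -- rewrite B's slice into the same field
      rw [show ((p : Int) + 2 - 2) * 2 = ((2 * p : Nat) : Int) from by push_cast; ring]
      rw [show ((2 * p : Nat) : Int) + 2 * (n : Int) = ((2 * p : Nat) : Int) + ((2 * n : Nat) : Int) from by push_cast; ring]
      rw [PySem.Str.toList_slice]
      simp only [PySem.Chars.slice_eq_listSlice]
      rw [PySem.List.slice_natCast_add]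
      set T := (val.toList.drop (2 * p)).take (2 * n) with hT
      have hTlen : T.length = 2 * n := by
        rw [hT, List.length_take, List.length_drop]; omega
      rw [pv_fromhex_eq n T hTlen hhex', Option.getD_some]
      have hnotlt : ¬ (((pvFromHex T).length : Int) < (n : Int)) := by
        rw [pv_fromHex_length n T hTlen]; omega
      rw [if_neg hnotlt]
      unfold pvIntFromBytesLE pvFromBytesLE
      have hblen : (pvFromHex T).length = n := pv_fromHex_length n T hTlen
      rw [hblen]
      have ex1 : (((n : Int)) * 8 - 1).toNat = 8 * n - 1 := by omega
      have ex2 : (((n : Int)) * 8).toNat = 8 * n := by omega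
      rw [ex1, ex2]
      split_ifs with hs hc
      · rw [if_pos (show sign = true ∧ _ from ⟨hs, hc⟩)]
      · rw [if_neg (show ¬(sign = true ∧ _) from by simp [hs, hc])]
      · rw [if_neg (show ¬(sign = true ∧ _) from by simp [hs])]
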